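-- pv_equiv track=rewrite | github.com/MatthMig/VoyageurDeCommerce | main.py | regrets_calculation
-- ===== SOURCE A (Python) =====
-- def regrets_calculation(matrix):
--     max_regret = 0
--     max_path = (0,0)
--     for i in range(len(matrix)):
--         for j in range(len(matrix[0])):
--             if matrix[i][j] != 0:
--                 continue
--             regret = min(matrix[i][:j] + matrix[i][j+1:]) + min([matrix[k][j] for k in range(len(matrix)) if k != i])
--             if regret > max_regret:
--                 max_regret = regret
--                 max_path = (i,j)
--     return max_path[0], max_path[1], max_regret
-- ===== SOURCE B (Python) =====
-- def _two_smallest(vals):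
--     m1 = None
--     m2 = None
--     for v in vals:
--         if m1 is None or v < m1:
--             m1, m2 = v, m1
--         elif m2 is None or v < m2:
--             m2 = v
--     return m1, m2
--
-- def _excl(pair):
--     m1, m2 = pair
--     return m2 if m1 == 0 else m1
--
-- def regrets_calculation(matrix):
--     if not matrix:
--         return 0, 0, 0
--     cols = len(matrix[0])
--     row_pair = [_two_smallest(row) for row in matrix]
--     col_pair = [_two_smallest([row[j] for row in matrix]) for j in range(cols)]
--     max_regret = 0
--     max_path = (0, 0)
--     for i, row in enumerate(matrix):
--         for j in range(cols):
--             if row[j] != 0: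
--                 continue
--             regret = _excl(row_pair[i]) + _excl(col_pair[j])
--             if regret > max_regret:
--                 max_regret = regret
--                 max_path = (i, j)
--     return max_path[0], max_path[1], max_regret
-- ===== Notes on version B (the rewrite author's own statement) =====
-- stated objective: alternative
-- what changed: Instead of re-scanning the row and the column for every zero cell, B precomputes the two smallest values of each row and each column once; because the element excluded at a zero cell is always 0, the min-without-that-cell is m2 if m1==0 else m1, a lookup per cell.
import Mathlib
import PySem

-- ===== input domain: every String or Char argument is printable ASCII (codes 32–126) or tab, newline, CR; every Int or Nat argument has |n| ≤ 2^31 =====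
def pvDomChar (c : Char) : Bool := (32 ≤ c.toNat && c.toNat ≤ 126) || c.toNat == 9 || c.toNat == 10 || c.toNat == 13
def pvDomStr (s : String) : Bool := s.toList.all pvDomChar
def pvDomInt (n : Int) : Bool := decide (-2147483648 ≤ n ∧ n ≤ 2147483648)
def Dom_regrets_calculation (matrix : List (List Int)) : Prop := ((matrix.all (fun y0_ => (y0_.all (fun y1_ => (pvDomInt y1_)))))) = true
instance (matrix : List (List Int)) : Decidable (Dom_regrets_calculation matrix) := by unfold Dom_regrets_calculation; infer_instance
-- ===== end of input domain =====

-- B replaces A's per-zero-cell row/column minimum scans by per-row / per-column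
-- two-smallest pairs precomputed once (a different algorithm; return value only, no mutation).

-- ===== PORT A =====
def regrets_calculation (matrix : List (List Int)) : Int × Int × Int :=
  let n := PySem.List.len matrix
  let st := (PySem.List.pyRange 0 n 1).foldl (fun st i =>
    let c := PySem.List.len (PySem.List.pyGetD matrix 0 [])
    (PySem.List.pyRange 0 c 1).foldl (fun st j =>
      let row := PySem.List.pyGetD matrix i []
      if PySem.List.pyGetD row j 0 ≠ 0 then st
      else
        let regret :=
          (PySem.List.min? (PySem.List.slice row none (some j) ++
              PySem.List.slice row (some (j + 1)) none) (fun x => x)).getD 0 +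
          (PySem.List.min? (((PySem.List.pyRange 0 n 1).filter (fun k => k != i)).map
              (fun k => PySem.List.pyGetD (PySem.List.pyGetD matrix k []) j 0)) (fun x => x)).getD 0
        if regret > st.1 then (regret, (i, j)) else st) st)
    ((0 : Int), ((0 : Int), (0 : Int)))
  (st.2.1, st.2.2, st.1)

-- ===== PORT B =====
-- loop body of Source B's _two_smallest
def pvStep (p : Option Int × Option Int) (v : Int) : Option Int × Option Int :=
  match p.1 with
  | none => (some v, none)
  | some a =>
    if v < a then (some v, some a)
    else
      match p.2 with
      | none => (some a, some v)
      | some b => if v < b then (some a, some v) else (some a, some b)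

def pvTwoSmallest (vals : List Int) : Option Int × Option Int :=
  vals.foldl pvStep (none, none)

-- Source B's _excl (Python returns None outside Pre_, which crashes at the later '+'; the default 0 is never reached inside Pre_)
def pvExcl (p : Option Int × Option Int) : Int :=
  if p.1 = some 0 then p.2.getD 0 else p.1.getD 0

def regrets_calculation_alt (matrix : List (List Int)) : Int × Int × Int :=
  match matrix with
  | [] => (0, 0, 0)
  | r0 :: _ =>
    let cols := PySem.List.len r0
    let rowPair := matrix.map pvTwoSmallest
    let colPair := (PySem.List.pyRange 0 cols 1).map
      (fun j => pvTwoSmallest (matrix.map (fun row => PySem.List.pyGetD row j 0)))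
    let st := (PySem.List.enumerate matrix 0).foldl (fun st p =>
      (PySem.List.pyRange 0 cols 1).foldl (fun st j =>
        if PySem.List.pyGetD p.2 j 0 ≠ 0 then st
        else
          let regret := pvExcl (PySem.List.pyGetD rowPair p.1 (none, none)) +
                        pvExcl (PySem.List.pyGetD colPair j (none, none))
          if regret > st.1 then (regret, (p.1, j)) else st) st)
      ((0 : Int), ((0 : Int), (0 : Int)))
    (st.2.1, st.2.2, st.1)

-- ===== PRECONDITION & SPEC =====
-- Pre_ excludes exactly the inputs where Python A raises: a row shorter than row 0
-- (IndexError on matrix[i][j]), or a zero cell in a 1-element row or a 1-row matrix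
-- (min() of an empty sequence, ValueError).
def Pre_regrets_calculation (matrix : List (List Int)) : Prop :=
  (∀ row ∈ matrix, (matrix.headD []).length ≤ row.length) ∧
  (∀ row ∈ matrix, (0 : Int) ∈ row.take (matrix.headD []).length → 2 ≤ row.length) ∧
  ((∃ row ∈ matrix, (0 : Int) ∈ row.take (matrix.headD []).length) → 2 ≤ matrix.length)
instance (matrix : List (List Int)) : Decidable (Pre_regrets_calculation matrix) := by
  unfold Pre_regrets_calculation; infer_instance

def pvWitness_regrets_calculation : List (List Int) := [[0, 3], [5, 0]]

def Spec_regrets_calculation (matrix : List (List Int)) (out : Int × Int × Int) : Prop := out = regrets_calculation_alt matrix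
instance (matrix : List (List Int)) (out : Int × Int × Int) : Decidable (Spec_regrets_calculation matrix out) := by unfold Spec_regrets_calculation; infer_instance

-- ===== CLAIM (what is proved, stated in full; the proofs are below) =====
def Claim_equal_regrets_calculation : Prop := ∀ (matrix : List (List Int)), Dom_regrets_calculation matrix → Pre_regrets_calculation matrix → Spec_regrets_calculation matrix (regrets_calculation matrix)

-- ===== LEMMAS AND PROOFS =====

lemma pvSecond_le (x y a b : Int) (t l' : List Int)
    (hperm : (x :: y :: t).Perm (a :: b :: l'))
    (hl : ∀ z ∈ l', b ≤ z) : b ≤ max x y := by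
  have hx : x ∈ a :: b :: l' := hperm.mem_iff.mp (by simp)
  have hy : y ∈ a :: b :: l' := hperm.mem_iff.mp (by simp)
  simp only [List.mem_cons] at hx hy
  rcases hx with hx | hx | hx
  · rcases hy with hy | hy | hy
    · -- x = a, y = a
      subst hx
      have h2 : (y :: t).Perm (b :: l') := hperm.cons_inv
      have hy' : y ∈ b :: l' := h2.mem_iff.mp (by simp)
      simp only [List.mem_cons] at hy'
      rcases hy' with hy' | hy'
      · rw [← hy']; exact le_max_right x y
      · exact le_trans (hl y hy') (le_max_right x y)
    · rw [← hy]; exact le_max_right x y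
    · exact le_trans (hl y hy) (le_max_right x y)
  · rw [← hx]; exact le_max_left x y
  · exact le_trans (hl x hx) (le_max_left x y)

lemma pvGo (l : List Int) : ∀ a b : Int, a ≤ b →
    ∃ a' b' l', l.foldl pvStep (some a, some b) = (some a', some b') ∧ a' ≤ b' ∧
      (a :: b :: l).Perm (a' :: b' :: l') ∧ ∀ z ∈ l', b' ≤ z := by
  induction l with
  | nil =>
    intro a b hab
    exact ⟨a, b, [], rfl, hab, List.Perm.refl _, by simp⟩
  | cons v rest ih =>
    intro a b hab
    by_cases h1 : v < a
    · obtain ⟨a', b', l'', heq, hab', hperm, hbd⟩ := ih v a (le_of_lt h1)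
      refine ⟨a', b', b :: l'', ?_, hab', ?_, ?_⟩
      · rw [List.foldl_cons]; rw [show pvStep (some a, some b) v = (some v, some a) by simp [pvStep, h1]]; exact heq
      · rw [List.perm_iff_count] at hperm ⊢
        intro z; have hc := hperm z
        simp only [List.count_cons] at hc ⊢
        split_ifs at hc ⊢ <;> omega
      · intro z hz
        rcases List.mem_cons.mp hz with hz | hz
        · subst hz
          have h := pvSecond_le v a a' b' rest l'' hperm hbd
          have : max v a = a := max_eq_right (le_of_lt h1)
          omega
        · exact hbd z hz
    · by_cases h2 : v < b
      · obtain ⟨a', b', l'', heq, hab', hperm, hbd⟩ := ih a v (not_lt.mp h1)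
        refine ⟨a', b', b :: l'', ?_, hab', ?_, ?_⟩
        · rw [List.foldl_cons]; rw [show pvStep (some a, some b) v = (some a, some v) by simp [pvStep, h1, h2]]; exact heq
        · rw [List.perm_iff_count] at hperm ⊢
          intro z; have hc := hperm z
          simp only [List.count_cons] at hc ⊢
          split_ifs at hc ⊢ <;> omega
        · intro z hz
          rcases List.mem_cons.mp hz with hz | hz
          · have h := pvSecond_le a v a' b' rest l'' hperm hbd
            have hm : max a v ≤ b := max_le hab (le_of_lt h2)
            rw [hz]; exact le_trans h hm
          · exact hbd z hz
      · obtain ⟨a', b', l'', heq, hab', hperm, hbd⟩ := ih a b hab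
        refine ⟨a', b', v :: l'', ?_, hab', ?_, ?_⟩
        · rw [List.foldl_cons]; rw [show pvStep (some a, some b) v = (some a, some b) by simp [pvStep, h1, h2]]; exact heq
        · rw [List.perm_iff_count] at hperm ⊢
          intro z; have hc := hperm z
          simp only [List.count_cons] at hc ⊢
          split_ifs at hc ⊢ <;> omega
        · intro z hz
          rcases List.mem_cons.mp hz with hz | hz
          · have h := pvSecond_le a b a' b' rest l'' hperm hbd
            have hm : max a b = b := max_eq_right hab
            rw [hz]; rw [hm] at h; exact le_trans h (not_lt.mp h2)
          · exact hbd z hz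

lemma pvSpec_of_perm (l : List Int) (a b : Int) (l' : List Int) (hab : a ≤ b)
    (P : l.Perm (a :: b :: l')) (hbd : ∀ z ∈ l', b ≤ z) :
    a ∈ l ∧ (∀ x ∈ l, a ≤ x) ∧ b ∈ l.erase a ∧ ∀ x ∈ l.erase a, b ≤ x := by
  have PE : (l.erase a).Perm (b :: l') := by
    have := P.erase a
    rwa [List.erase_cons_head] at this
  refine ⟨P.mem_iff.mpr (by simp), ?_, PE.mem_iff.mpr (by simp), ?_⟩
  · intro x hx
    have := P.mem_iff.mp hx
    simp only [List.mem_cons] at this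
    rcases this with h | h | h
    · omega
    · omega
    · exact le_trans hab (hbd x h)
  · intro x hx
    have := PE.mem_iff.mp hx
    simp only [List.mem_cons] at this
    rcases this with h | h
    · omega
    · exact hbd x h

lemma pvTwoSmallest_spec (l : List Int) (h2 : 2 ≤ l.length) :
    ∃ a b, pvTwoSmallest l = (some a, some b) ∧ a ≤ b ∧ a ∈ l ∧ (∀ x ∈ l, a ≤ x) ∧
      b ∈ l.erase a ∧ ∀ x ∈ l.erase a, b ≤ x := by
  match l with
  | [] => simp at h2
  | [x] => simp at h2
  | x :: y :: rest =>
    have hstep : pvTwoSmallest (x :: y :: rest) =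
        rest.foldl pvStep (pvStep (some x, none) y) := by
      simp [pvTwoSmallest, List.foldl_cons, pvStep]
    by_cases hyx : y < x
    · have h1 : pvStep (some x, none) y = (some y, some x) := by simp [pvStep, hyx]
      obtain ⟨a, b, l', heq, hab, hperm, hbd⟩ := pvGo rest y x (le_of_lt hyx)
      have P : (x :: y :: rest).Perm (a :: b :: l') :=
        (List.Perm.swap x y rest).symm.trans hperm
      obtain ⟨m1, m2, m3, m4⟩ := pvSpec_of_perm _ a b l' hab P hbd
      exact ⟨a, b, by rw [hstep, h1, heq], hab, m1, m2, m3, m4⟩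
    · have h1 : pvStep (some x, none) y = (some x, some y) := by simp [pvStep, hyx]
      obtain ⟨a, b, l', heq, hab, hperm, hbd⟩ := pvGo rest x y (not_lt.mp hyx)
      obtain ⟨m1, m2, m3, m4⟩ := pvSpec_of_perm _ a b l' hab hperm hbd
      exact ⟨a, b, by rw [hstep, h1, heq], hab, m1, m2, m3, m4⟩

lemma pvMinEraseIdx (l : List Int) (k : Nat) (hk : k < l.length)
    (h0 : l[k] = 0) (h2 : 2 ≤ l.length) :
    (PySem.List.min? (l.eraseIdx k) (fun x => x)).getD 0 = pvExcl (pvTwoSmallest l) := by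
  obtain ⟨a, b, heq, hab, hal, hamin, hbe, hbmin⟩ := pvTwoSmallest_spec l h2
  have hPm : l.Perm (l[k] :: l.eraseIdx k) := by
    have hsplit : l = l.take k ++ l[k] :: l.drop (k + 1) := by
      conv_lhs => rw [← List.take_append_drop k l, List.drop_eq_getElem_cons hk]
    rw [List.eraseIdx_eq_take_drop_succ]
    have h1 : l.Perm (l.take k ++ l[k] :: l.drop (k + 1)) := by rw [← hsplit]
    exact h1.trans List.perm_middle
  have hne : l.eraseIdx k ≠ [] := by
    have := List.length_eraseIdx (l := l) (i := k)
    intro h; rw [h] at this; simp [hk] at this; omega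
  rw [heq]
  cases hmin : PySem.List.min? (l.eraseIdx k) (fun x => x) with
  | none => exact absurd ((PySem.List.min?_eq_none_iff _ _).mp hmin) hne
  | some m =>
    have hmem : m ∈ l.eraseIdx k := PySem.List.min?_mem hmin
    have hmm : ∀ y ∈ l.eraseIdx k, m ≤ y := fun y hy => PySem.List.min?_isMin hmin y hy
    simp only [Option.getD_some, pvExcl, Option.some.injEq]
    by_cases ha : a = 0
    · subst ha
      rw [if_pos rfl]
      have h0mem : (0 : Int) ∈ l := h0 ▸ List.getElem_mem hk
      have hPe : (l.eraseIdx k).Perm (l.erase 0) := by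
        have := (hPm.symm.trans (List.perm_cons_erase h0mem))
        rw [h0] at this
        exact this.cons_inv
      have h1 : m ≤ b := hmm b (hPe.mem_iff.mpr hbe)
      have h2' : b ≤ m := hbmin m (hPe.mem_iff.mp hmem)
      omega
    · rw [if_neg (by simpa using ha)]
      have ha0 : a ≤ 0 := h0 ▸ hamin l[k] (List.getElem_mem hk)
      have hae : a ∈ l.eraseIdx k := by
        have := hPm.mem_iff.mp hal
        rw [h0] at this
        rcases List.mem_cons.mp this with h | h
        · exact absurd h ha
        · exact h
      have h1 : m ≤ a := hmm a hae
      have h2' : a ≤ m := hamin m (hPm.mem_iff.mpr (List.mem_cons_of_mem _ hmem))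
      omega

lemma pvMapRange {α : Type} (xs : List α) (d : α) (t : Nat) (ht : t ≤ xs.length) :
    (PySem.List.pyRange 0 (t : Int) 1).map (fun k => PySem.List.pyGetD xs k d) = xs.take t := by
  induction t with
  | zero => simp [PySem.List.pyRange_one_eq_nil]
  | succ t ih =>
    have hc : ((t + 1 : Nat) : Int) = (t : Int) + 1 := by push_cast; ring
    rw [hc, PySem.List.pyRange_one_succ_right (by positivity), List.map_append,
      ih (by omega), List.take_add_one]
    simp [List.getElem?_eq_getElem (by omega : t < xs.length)]

lemma pvColA {α β : Type} (xs : List α) (d : α) (g : α → β) (i : Int)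
    (h0 : 0 ≤ i) (hn : i < PySem.List.len xs) :
    ((PySem.List.pyRange 0 (PySem.List.len xs) 1).filter (fun k => k != i)).map
        (fun k => g (PySem.List.pyGetD xs k d)) = (xs.map g).eraseIdx i.toNat := by
  have hlen : PySem.List.len xs = (xs.length : Int) := by simp [PySem.List.len_eq]
  have hsplit : PySem.List.pyRange 0 (PySem.List.len xs) 1 =
      PySem.List.pyRange 0 i 1 ++ (i :: PySem.List.pyRange (i + 1) (PySem.List.len xs) 1) := by
    rw [PySem.List.pyRange_one_append 0 i (PySem.List.len xs) h0 (le_of_lt hn),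
      PySem.List.pyRange_one_cons hn]
  rw [hsplit, List.filter_append, List.filter_cons]
  have hf1 : (PySem.List.pyRange 0 i 1).filter (fun k => k != i) = PySem.List.pyRange 0 i 1 := by
    apply List.filter_eq_self.mpr
    intro k hk
    have := (PySem.List.mem_pyRange_one).mp hk
    simp; omega
  have hf2 : (PySem.List.pyRange (i+1) (PySem.List.len xs) 1).filter (fun k => k != i) =
      PySem.List.pyRange (i+1) (PySem.List.len xs) 1 := by
    apply List.filter_eq_self.mpr
    intro k hk
    have := (PySem.List.mem_pyRange_one).mp hk
    simp; omega
  rw [hf1, hf2]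
  simp only [bne_self_eq_false, Bool.false_eq_true, if_false, List.map_append]
  have hm1 : (PySem.List.pyRange 0 i 1).map (fun k => g (PySem.List.pyGetD xs k d)) =
      (xs.map g).take i.toNat := by
    have hi : i = ((i.toNat : Nat) : Int) := by omega
    rw [hi, show (fun k => g (PySem.List.pyGetD xs k d)) =
        g ∘ (fun k => PySem.List.pyGetD xs k d) from rfl, ← List.map_map,
      pvMapRange xs d i.toNat (by omega), List.map_take]
    simp
    omega
  have hm2 : (PySem.List.pyRange (i+1) (PySem.List.len xs) 1).map
      (fun k => g (PySem.List.pyGetD xs k d)) = (xs.map g).drop (i.toNat + 1) := by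
    rw [show (fun k => g (PySem.List.pyGetD xs k d)) =
        g ∘ (fun k => PySem.List.pyGetD xs k d) from rfl, ← List.map_map,
      PySem.List.map_pyGetD_pyRange xs d (by omega), List.map_drop]
    congr 1
    omega
  rw [hm1, hm2, List.eraseIdx_eq_take_drop_succ]

theorem pvMain (matrix : List (List Int))
    (hlen : ∀ row ∈ matrix, (matrix.headD []).length ≤ row.length)
    (hrow2 : ∀ row ∈ matrix, (0 : Int) ∈ row.take (matrix.headD []).length → 2 ≤ row.length)
    (hmat2 : (∃ row ∈ matrix, (0 : Int) ∈ row.take (matrix.headD []).length) → 2 ≤ matrix.length) :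
    regrets_calculation matrix = regrets_calculation_alt matrix := by
  cases matrix with
  | nil => rfl
  | cons r0 rest =>
    simp only [regrets_calculation, regrets_calculation_alt]
    rw [PySem.List.enumerate_eq_map_pyRange (d := ([] : List Int)), List.foldl_map]
    refine congrArg (fun st : Int × (Int × Int) => (st.2.1, st.2.2, st.1)) ?_
    simp only [PySem.List.pyGetD_zero_cons]
    apply PySem.List.foldl_congr_mem
    intro st i hi
    obtain ⟨h0i, hilt⟩ := (PySem.List.mem_pyRange_one).mp hi
    apply PySem.List.foldl_congr_mem
    intro st' j hj
    obtain ⟨h0j, hjlt⟩ := (PySem.List.mem_pyRange_one).mp hj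
    have hlenM : PySem.List.len (r0 :: rest) = ((r0 :: rest).length : Int) := by
      simp [PySem.List.len_eq]
    have hlenr0 : PySem.List.len r0 = (r0.length : Int) := by simp [PySem.List.len_eq]
    have hiN : i.toNat < (r0 :: rest).length := by omega
    have hrowe : PySem.List.pyGetD (r0 :: rest) i [] = (r0 :: rest)[i.toNat] :=
      PySem.List.pyGetD_eq_getElem _ _ h0i (by omega)
    have hrmem : (r0 :: rest)[i.toNat] ∈ (r0 :: rest) := List.getElem_mem hiN
    have hrlen : r0.length ≤ (r0 :: rest)[i.toNat].length := hlen _ hrmem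
    have hjN : j.toNat < (r0 :: rest)[i.toNat].length := by omega
    by_cases hz : PySem.List.pyGetD (PySem.List.pyGetD (r0 :: rest) i []) j 0 = 0
    · simp only [hz, ne_eq, not_true_eq_false, if_false]
      have h0row : (r0 :: rest)[i.toNat][j.toNat] = 0 := by
        rw [hrowe] at hz
        rwa [PySem.List.pyGetD_eq_getElem _ _ h0j (by omega)] at hz
      have htake : (0 : Int) ∈ (r0 :: rest)[i.toNat].take r0.length := by
        rw [← h0row]
        have hlt : j.toNat < ((r0 :: rest)[i.toNat].take r0.length).length := by
          simp; omega
        rw [← List.getElem_take (xs := (r0 :: rest)[i.toNat]) (j := r0.length)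
          (i := j.toNat) (h := hlt)]
        exact List.getElem_mem _
      have h2row : 2 ≤ (r0 :: rest)[i.toNat].length := hrow2 _ hrmem htake
      have h2mat : 2 ≤ (r0 :: rest).length := hmat2 ⟨_, hrmem, htake⟩
      have hRA :
          (PySem.List.min? (PySem.List.slice (PySem.List.pyGetD (r0 :: rest) i []) none (some j) ++
              PySem.List.slice (PySem.List.pyGetD (r0 :: rest) i []) (some (j + 1)) none)
            (fun x => x)).getD 0
          = pvExcl (pvTwoSmallest (r0 :: rest)[i.toNat]) := by
        rw [hrowe, PySem.List.slice_to _ h0j, PySem.List.slice_from _ (by omega : (0:Int) ≤ j + 1),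
          show (j + 1).toNat = j.toNat + 1 from by omega,
          ← List.eraseIdx_eq_take_drop_succ]
        exact pvMinEraseIdx _ j.toNat hjN h0row h2row
      have hRC :
          (PySem.List.min? (((PySem.List.pyRange 0 (PySem.List.len (r0 :: rest)) 1).filter
              (fun k => k != i)).map
              (fun k => PySem.List.pyGetD (PySem.List.pyGetD (r0 :: rest) k []) j 0))
            (fun x => x)).getD 0
          = pvExcl (pvTwoSmallest ((r0 :: rest).map (fun row => PySem.List.pyGetD row j 0))) := by
        rw [pvColA (r0 :: rest) [] (fun row => PySem.List.pyGetD row j 0) i h0i hilt]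
        refine pvMinEraseIdx _ i.toNat
          (by simp only [List.length_map]; exact hiN) ?_
          (by simp only [List.length_map]; exact h2mat)
        rw [List.getElem_map]
        rw [hrowe] at hz
        exact hz
      have hRB1 : PySem.List.pyGetD ((r0 :: rest).map pvTwoSmallest) i (none, none)
          = pvTwoSmallest (r0 :: rest)[i.toNat] := by
        rw [PySem.List.pyGetD_eq_getElem _ _ h0i (by simp only [List.length_map]; simp only [PySem.List.len_eq] at hlenM; omega),
          List.getElem_map]
      have hRB2 : PySem.List.pyGetD ((PySem.List.pyRange 0 (PySem.List.len r0) 1).map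
            (fun j => pvTwoSmallest ((r0 :: rest).map (fun row => PySem.List.pyGetD row j 0))))
            j (none, none)
          = pvTwoSmallest ((r0 :: rest).map (fun row => PySem.List.pyGetD row j 0)) :=
        PySem.List.pyGetD_map_pyRange_of_nonneg _ _ _ _ h0j hjlt
      rw [hRA, hRC, hRB1, hRB2]
    · simp only [hz, ne_eq, not_false_eq_true, if_true]


-- ===== VERDICT (by name: the statement is the Claim_ definition above) =====
theorem regrets_calculation_spec : Claim_equal_regrets_calculation := by
  intro matrix _ hpre
  unfold Spec_regrets_calculation
  obtain ⟨h1, h2, h3⟩ := hpre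
  exact pvMain matrix h1 h2 h3
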